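-- pv_equiv track=rewrite | github.com/batinium/automated-euclidean-approximation-system | src/aeas/canb_targets.py | is_gauss_wantzel
-- ===== SOURCE A (Python) =====
-- FERMAT_PRIMES = (3, 5, 17, 257, 65537)
--
-- def is_gauss_wantzel(n: int) -> bool:
--     """Return whether a regular n-gon is ruler-and-compass constructible."""
--     if n < 1:
--         return False
--     while n % 2 == 0:
--         n //= 2
--     for prime in FERMAT_PRIMES:
--         if n % prime == 0:
--             n //= prime
--             if n % prime == 0:
--                 return False
--     return n == 1
-- ===== SOURCE B (Python) =====
-- FERMAT_PRIMES = (3, 5, 17, 257, 65537)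
--
-- # All products of subsets of the five distinct Fermat primes (32 values, incl. 1).
-- _table = [1]
-- for _p in FERMAT_PRIMES:
--     _table += [_s * _p for _s in _table]
-- CONSTRUCTIBLE_ODD = frozenset(_table)
--
--
-- def is_gauss_wantzel(n: int) -> bool:
--     """Return whether a regular n-gon is ruler-and-compass constructible."""
--     if n < 1:
--         return False
--     while n % 2 == 0:
--         n //= 2
--     return n in CONSTRUCTIBLE_ODD
-- ===== Notes on version B (the rewrite author's own statement) =====
-- stated objective: idiomatic
-- what changed: Replaces the per-prime trial-division-with-square-check scan by a single membership test of the odd part against a precomputed table of all products of distinct Fermat primes.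
import Mathlib
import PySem

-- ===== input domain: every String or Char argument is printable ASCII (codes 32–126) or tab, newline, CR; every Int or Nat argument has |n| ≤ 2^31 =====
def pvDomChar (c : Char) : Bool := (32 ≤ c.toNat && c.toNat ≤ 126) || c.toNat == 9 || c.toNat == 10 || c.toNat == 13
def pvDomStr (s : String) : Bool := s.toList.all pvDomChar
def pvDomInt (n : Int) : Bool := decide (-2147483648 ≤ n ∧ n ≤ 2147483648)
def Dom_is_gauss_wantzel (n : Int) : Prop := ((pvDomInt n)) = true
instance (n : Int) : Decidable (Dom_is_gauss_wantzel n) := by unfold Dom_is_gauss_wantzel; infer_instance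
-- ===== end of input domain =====

-- B replaces A's per-prime trial-division scan by a membership test of the odd
-- part against a precomputed table of all products of distinct Fermat primes (idiomatic; not faster).

-- ===== PORT A =====
-- the `while n % 2 == 0: n //= 2` loop; Python only enters it with n ≥ 1,
-- so the `1 ≤ n` conjunct is a pure totality guard.
def pvStripTwos (n : Int) : Int :=
  if hc : 1 ≤ n ∧ PySem.Int.mod n 2 = 0 then
    pvStripTwos (PySem.Int.floordiv n 2)
  else n
termination_by n.toNat
decreasing_by
  have h2 : PySem.Int.floordiv n 2 = n / 2 := PySem.Int.floordiv_eq_ediv_of_pos (by omega)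
  have : 2 ∣ n := (PySem.Int.mod_eq_zero_iff_dvd n 2).mp hc.2
  omega

-- the `for prime in FERMAT_PRIMES` loop with its early returns
def pvFermatLoop : List Int → Int → Bool
  | [], n => n == 1
  | p :: ps, n =>
    if PySem.Int.mod n p == 0 then
      let n' := PySem.Int.floordiv n p
      if PySem.Int.mod n' p == 0 then false else pvFermatLoop ps n'
    else pvFermatLoop ps n

def is_gauss_wantzel (n : Int) : Bool :=
  if n < 1 then false
  else pvFermatLoop [3, 5, 17, 257, 65537] (pvStripTwos n)

-- ===== PORT B =====
-- module-level table: products of all subsets of the Fermat primes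
def pvOddTable : List Int :=
  [3, 5, 17, 257, 65537].foldl (fun acc p => acc ++ acc.map (· * p)) [1]

def is_gauss_wantzel_alt (n : Int) : Bool :=
  if n < 1 then false
  else pvOddTable.contains (pvStripTwos n)

-- ===== PRECONDITION & SPEC =====
def Spec_is_gauss_wantzel (n : Int) (out : Bool) : Prop := out = is_gauss_wantzel_alt n
instance (n : Int) (out : Bool) : Decidable (Spec_is_gauss_wantzel n out) := by unfold Spec_is_gauss_wantzel; infer_instance

-- ===== CLAIM (what is proved, stated in full; the proofs are below) =====
def Claim_equal_is_gauss_wantzel : Prop := ∀ (n : Int), Dom_is_gauss_wantzel n → Spec_is_gauss_wantzel n (is_gauss_wantzel n)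

-- ===== LEMMAS AND PROOFS =====

-- subset-products of a prime list, in the recursion order the proof uses
def pvSubs : List Int → List Int
  | [] => [1]
  | p :: ps => pvSubs ps ++ (pvSubs ps).map (· * p)

theorem pvFoldl_mem (ps : List Int) (a : List Int) (m : Int) :
    (m ∈ ps.foldl (fun acc p => acc ++ acc.map (· * p)) a) ↔
    ∃ x ∈ a, ∃ d ∈ pvSubs ps, m = x * d := by
  induction ps generalizing a with
  | nil => simp [pvSubs]
  | cons p ps ih =>
    simp only [List.foldl_cons, ih, pvSubs, List.mem_append, List.mem_map]
    constructor
    · rintro ⟨x, hx, d, hd, rfl⟩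
      rcases hx with hx | ⟨y, hy, rfl⟩
      · exact ⟨x, hx, d, Or.inl hd, rfl⟩
      · exact ⟨y, hy, d * p, Or.inr ⟨d, hd, rfl⟩, by ring⟩
    · rintro ⟨x, hx, d, hd, rfl⟩
      rcases hd with hd | ⟨e, he, rfl⟩
      · exact ⟨x, Or.inl hx, d, hd, rfl⟩
      · exact ⟨x * p, Or.inr ⟨x, hx, rfl⟩, e, he, by ring⟩

theorem pvSubs_not_dvd (p : Int) (hp : Prime p) (ps : List Int)
    (h : ∀ q ∈ ps, ¬ p ∣ q) : ∀ d ∈ pvSubs ps, ¬ p ∣ d := by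
  induction ps with
  | nil =>
    intro d hd
    simp [pvSubs] at hd
    subst hd
    exact hp.not_dvd_one
  | cons q qs ih =>
    intro d hd hdvd
    simp only [pvSubs, List.mem_append, List.mem_map] at hd
    rcases hd with hd | ⟨e, he, rfl⟩
    · exact ih (fun r hr => h r (List.mem_cons_of_mem _ hr)) d hd hdvd
    · rcases hp.dvd_mul.mp hdvd with h1 | h1
      · exact ih (fun r hr => h r (List.mem_cons_of_mem _ hr)) e he h1
      · exact h q List.mem_cons_self h1

theorem pvFermatLoop_iff (ps : List Int) (m : Int) (hm : 1 ≤ m)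
    (hp : ∀ p ∈ ps, Prime p ∧ 0 < p)
    (hpw : ps.Pairwise (fun p q => ¬ p ∣ q)) :
    (pvFermatLoop ps m = true ↔ m ∈ pvSubs ps) := by
  induction ps generalizing m with
  | nil => simp [pvFermatLoop, pvSubs]
  | cons p ps ih =>
    obtain ⟨hprime, hppos⟩ := hp p List.mem_cons_self
    have hp' : ∀ q ∈ ps, Prime q ∧ 0 < q := fun q hq => hp q (List.mem_cons_of_mem _ hq)
    have hpw' := (List.pairwise_cons.mp hpw).2
    have hnd : ∀ q ∈ ps, ¬ p ∣ q := (List.pairwise_cons.mp hpw).1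
    have hcop : ∀ d ∈ pvSubs ps, ¬ p ∣ d := pvSubs_not_dvd p hprime ps hnd
    by_cases hdvd : p ∣ m
    · -- p divides m
      have hmod : PySem.Int.mod m p = 0 := (PySem.Int.mod_eq_zero_iff_dvd m p).mpr hdvd
      have hfd : PySem.Int.floordiv m p = m / p := PySem.Int.floordiv_eq_ediv_of_pos hppos
      have hmeq : m = (m / p) * p := by
        obtain ⟨c, rfl⟩ := hdvd
        rw [Int.mul_ediv_cancel_left _ (by omega)]; ring
      have hm' : 1 ≤ m / p := by
        rcases Int.lt_or_le 0 (m / p) with h | h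
        · omega
        · nlinarith [hmeq]
      by_cases hsq : p ∣ m / p
      · -- square of p divides m : A returns false, m ∉ table
        have hmod2 : PySem.Int.mod (PySem.Int.floordiv m p) p = 0 := by
          rw [hfd]; exact (PySem.Int.mod_eq_zero_iff_dvd _ p).mpr hsq
        simp only [pvFermatLoop, hmod, hmod2, beq_self_eq_true, if_true]
        constructor
        · intro h; simp at h
        · intro hmem
          exfalso
          simp only [pvSubs, List.mem_append, List.mem_map] at hmem
          rcases hmem with hmem | ⟨d, hd, hde⟩
          · exact hcop m hmem hdvd
          · -- m = d * p with p ∤ d, but p ∣ m/p gives p ∣ d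
            have : d = m / p := by
              have hpne : p ≠ 0 := by omega
              have : d * p = (m / p) * p := by rw [hde]; exact hmeq
              exact mul_right_cancel₀ hpne this
            exact hcop d hd (this ▸ hsq)
      · have hmod2 : ¬ (PySem.Int.mod (PySem.Int.floordiv m p) p == 0) = true := by
          simp only [hfd, beq_iff_eq, PySem.Int.mod_eq_zero_iff_dvd]
          exact hsq
        simp only [pvFermatLoop, hmod, beq_self_eq_true, if_true, hmod2,
          Bool.false_eq_true, if_false]
        rw [ih (PySem.Int.floordiv m p) (hfd ▸ hm') hp' hpw', hfd]
        constructor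
        · intro hmem
          simp only [pvSubs, List.mem_append, List.mem_map]
          exact Or.inr ⟨m / p, hmem, hmeq.symm⟩
        · intro hmem
          simp only [pvSubs, List.mem_append, List.mem_map] at hmem
          rcases hmem with hmem | ⟨d, hd, hde⟩
          · exact absurd hdvd (hcop m hmem)
          · have hpne : p ≠ 0 := by omega
            have : d = m / p := by
              have : d * p = (m / p) * p := by rw [hde]; exact hmeq
              exact mul_right_cancel₀ hpne this
            exact this ▸ hd
    · -- p does not divide m
      have hmod : ¬ (PySem.Int.mod m p == 0) = true := by
        simp only [beq_iff_eq, PySem.Int.mod_eq_zero_iff_dvd]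
        exact hdvd
      simp only [pvFermatLoop, hmod, Bool.false_eq_true, if_false]
      rw [ih m hm hp' hpw']
      simp only [pvSubs, List.mem_append, List.mem_map]
      constructor
      · exact Or.inl
      · rintro (h | ⟨d, hd, rfl⟩)
        · exact h
        · exact absurd ⟨d, by ring⟩ hdvd

theorem pvStripTwos_pos (n : Int) (hn : 1 ≤ n) : 1 ≤ pvStripTwos n := by
  induction n using pvStripTwos.induct with
  | case1 n h ih =>
    rw [pvStripTwos, dif_pos h]
    have h2 : PySem.Int.floordiv n 2 = n / 2 := PySem.Int.floordiv_eq_ediv_of_pos (by omega)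
    have hd : 2 ∣ n := (PySem.Int.mod_eq_zero_iff_dvd n 2).mp h.2
    exact ih (by omega)
  | case2 n h => rw [pvStripTwos, dif_neg h]; exact hn

theorem pvPrimeFacts : ∀ p ∈ ([3, 5, 17, 257, 65537] : List Int), Prime p ∧ 0 < p := by
  intro p hp
  fin_cases hp <;> exact ⟨by norm_num, by norm_num⟩

theorem pvPairwiseFacts : ([3, 5, 17, 257, 65537] : List Int).Pairwise (fun p q => ¬ p ∣ q) := by
  decide

-- ===== VERDICT (by name: the statement is the Claim_ definition above) =====
theorem is_gauss_wantzel_spec : Claim_equal_is_gauss_wantzel := by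
  intro n _
  unfold Spec_is_gauss_wantzel is_gauss_wantzel is_gauss_wantzel_alt
  by_cases hn : n < 1
  · simp [hn]
  · simp only [hn, if_false]
    have hm : 1 ≤ pvStripTwos n := pvStripTwos_pos n (by omega)
    have hiff := pvFermatLoop_iff [3, 5, 17, 257, 65537] (pvStripTwos n) hm
      pvPrimeFacts pvPairwiseFacts
    have hmem : (pvStripTwos n ∈ pvOddTable) ↔
        pvStripTwos n ∈ pvSubs [3, 5, 17, 257, 65537] := by
      unfold pvOddTable
      rw [pvFoldl_mem]
      simp
    rw [Bool.eq_iff_iff, List.contains_iff_mem, hiff, hmem]
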